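-- pv_equiv track=rewrite | github.com/yaoinxia/leetcode_study | huawei_rumen_zaoyin.py | zaoyin
-- ===== SOURCE A (Python) =====
-- def zaoyin(nums):
--     d = {}
--     for i in range(len(nums)):
--         if nums[i] not in d:
--             d[nums[i]] = [1, i, i]  # [个数， 开始， 结束]
--         else:
--             d[nums[i]][0] += 1
--             d[nums[i]][2] = i   # 记录结束
--     max_noise = 0   # 最大噪声频率
--     for item in d:
--         if d[item][0] >= max_noise:
--             max_noise = d[item][0]
--     min_length = len(nums)
--     for item in d:
--         if d[item][0] == max_noise and (d[item][2] - d[item][1] + 1) < min_length: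
--             min_length = d[item][2] - d[item][1] + 1
--     return min_length
-- ===== SOURCE B (Python) =====
-- def zaoyin(nums):
--     count = {}
--     first = {}
--     degree = 0
--     min_length = 0
--     for i, x in enumerate(nums):
--         if x not in first:
--             first[x] = i
--         c = count.get(x, 0) + 1
--         count[x] = c
--         if c > degree:
--             degree = c
--             min_length = i - first[x] + 1
--         elif c == degree:
--             span = i - first[x] + 1
--             if span < min_length:
--                 min_length = span
--     return min_length
-- ===== Notes on version B (the rewrite author's own statement) =====
-- stated objective: alternative
-- what changed: Replaced A's build-dict-then-two-extra-passes-over-the-dict structure by a single pass over nums that maintains running count and first-index dicts plus scalar degree and min_length, updating the answer on the fly at each element.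
import Mathlib
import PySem

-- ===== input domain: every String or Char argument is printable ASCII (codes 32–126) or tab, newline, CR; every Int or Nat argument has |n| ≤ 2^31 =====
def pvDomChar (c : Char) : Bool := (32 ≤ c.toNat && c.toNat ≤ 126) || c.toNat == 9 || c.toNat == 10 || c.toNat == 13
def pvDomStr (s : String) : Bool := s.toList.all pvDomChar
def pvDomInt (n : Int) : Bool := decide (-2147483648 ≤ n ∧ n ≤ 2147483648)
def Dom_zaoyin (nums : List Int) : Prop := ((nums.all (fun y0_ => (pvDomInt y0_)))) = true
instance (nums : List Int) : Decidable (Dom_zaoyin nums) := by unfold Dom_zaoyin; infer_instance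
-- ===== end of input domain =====

-- B replaces A's build-dict-then-two-more-passes-over-the-dict by a single pass over nums
-- maintaining running count/first-index dicts and scalar degree/min_length (objective: alternative, one pass).

-- ===== PORT A =====
-- A's dict maps value ↦ [count, start, end]; the loop body, one step per index/element pair.
def zaoyinStep (d : PySem.Dict Int (Int × Int × Int)) (p : Int × Int) :
    PySem.Dict Int (Int × Int × Int) :=
  match d.get? p.2 with
  | none => d.insert p.2 (1, p.1, p.1)
  | some v => d.insert p.2 (v.1 + 1, v.2.1, p.1)

def zaoyin (nums : List Int) : Int :=
  let d := (PySem.List.enumerate nums).foldl zaoyinStep PySem.Dict.empty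
  let mx := d.items.foldl (fun m it => if it.2.1 ≥ m then it.2.1 else m) 0
  d.items.foldl
    (fun m it => if it.2.1 = mx ∧ it.2.2.2 - it.2.2.1 + 1 < m then it.2.2.2 - it.2.2.1 + 1 else m)
    ((nums.length : Int))

-- ===== PORT B =====
-- state = (count dict, first-index dict, degree, min_length); one step of B's single loop.
def zaoyinAltStep (s : PySem.Dict Int Int × PySem.Dict Int Int × Int × Int) (p : Int × Int) :
    PySem.Dict Int Int × PySem.Dict Int Int × Int × Int :=
  let fst := if s.2.1.contains p.2 then s.2.1 else s.2.1.insert p.2 p.1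
  let c := s.1.getD p.2 0 + 1
  let cnt := s.1.insert p.2 c
  if c > s.2.2.1 then (cnt, fst, c, p.1 - fst.getD p.2 0 + 1)
  else if c = s.2.2.1 then
    let span := p.1 - fst.getD p.2 0 + 1
    (cnt, fst, s.2.2.1, if span < s.2.2.2 then span else s.2.2.2)
  else (cnt, fst, s.2.2.1, s.2.2.2)

def zaoyin_alt (nums : List Int) : Int :=
  ((PySem.List.enumerate nums).foldl zaoyinAltStep
    (PySem.Dict.empty, PySem.Dict.empty, 0, 0)).2.2.2

-- ===== PRECONDITION & SPEC =====
def Spec_zaoyin (nums : List Int) (out : Int) : Prop := out = zaoyin_alt nums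
instance (nums : List Int) (out : Int) : Decidable (Spec_zaoyin nums out) := by unfold Spec_zaoyin; infer_instance

-- ===== CLAIM (what is proved, stated in full; the proofs are below) =====
def Claim_equal_zaoyin : Prop := ∀ (nums : List Int), Dom_zaoyin nums → Spec_zaoyin nums (zaoyin nums)

-- ===== LEMMAS AND PROOFS =====

-- count of x in p, as an Int
def cntI (p : List Int) (x : Int) : Int := (p.count x : Int)

-- index of the first occurrence of x in p (meaningful when x ∈ p)
def fIdx : List Int → Int → Int
  | [], _ => 0
  | a :: t, x => if a = x then 0 else fIdx t x + 1

-- index of the last occurrence of x in p (meaningful when x ∈ p)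
def lIdx (p : List Int) (x : Int) : Int := (p.length : Int) - 1 - fIdx p.reverse x

def spanI (p : List Int) (x : Int) : Int := lIdx p x - fIdx p x + 1

-- d is the maximal frequency in p
def IsDeg (p : List Int) (d : Int) : Prop :=
  (∀ x ∈ p, cntI p x ≤ d) ∧ (p = [] → d = 0) ∧ (p ≠ [] → ∃ x ∈ p, cntI p x = d)

-- m is the minimal span among elements of maximal frequency d
def SpanMin (p : List Int) (d m : Int) : Prop :=
  (p = [] → m = 0) ∧
  (p ≠ [] → (∀ x ∈ p, cntI p x = d → m ≤ spanI p x) ∧ ∃ x ∈ p, cntI p x = d ∧ m = spanI p x)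

theorem fIdx_nonneg (p : List Int) (x : Int) : 0 ≤ fIdx p x := by
  induction p with
  | nil => simp [fIdx]
  | cons a t ih => simp only [fIdx]; split <;> omega

theorem fIdx_append_of_mem {p : List Int} {x : Int} (q : List Int) (h : x ∈ p) :
    fIdx (p ++ q) x = fIdx p x := by
  induction p with
  | nil => simp at h
  | cons a t ih =>
    simp only [List.cons_append, fIdx]
    rcases List.mem_cons.1 h with h' | h'
    · simp [h']
    · split <;> simp [ih h']

theorem fIdx_append_of_not_mem {p : List Int} {x : Int} (q : List Int) (h : x ∉ p) :
    fIdx (p ++ q) x = (p.length : Int) + fIdx q x := by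
  induction p with
  | nil => simp
  | cons a t ih =>
    simp only [List.cons_append, fIdx]
    have hax : a ≠ x := fun hh => h (by simp [hh])
    have : x ∉ t := fun hh => h (by simp [hh])
    simp [hax, ih this]; ring

theorem lIdx_append_self (p : List Int) (y : Int) : lIdx (p ++ [y]) y = (p.length : Int) := by
  simp [lIdx, fIdx]

theorem lIdx_append_of_ne {x y : Int} (p : List Int) (h : x ≠ y) :
    lIdx (p ++ [y]) x = lIdx p x := by
  simp only [lIdx, List.reverse_append, List.reverse_singleton, List.singleton_append, fIdx,
    List.length_append, List.length_singleton]
  have : y ≠ x := fun hh => h hh.symm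
  simp [this]; ring

theorem cntI_append (p : List Int) (y x : Int) :
    cntI (p ++ [y]) x = cntI p x + (if y = x then 1 else 0) := by
  simp [cntI, List.count_append]
  split <;> simp_all

theorem cntI_nonneg (p : List Int) (x : Int) : 0 ≤ cntI p x := by simp [cntI]

theorem cntI_pos {p : List Int} {x : Int} (h : x ∈ p) : 1 ≤ cntI p x := by
  have := List.count_pos_iff.2 h
  simp only [cntI]; omega

theorem lIdx_le (p : List Int) (x : Int) : lIdx p x ≤ (p.length : Int) - 1 := by
  have := fIdx_nonneg p.reverse x
  simp only [lIdx]; omega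

theorem spanI_le (p : List Int) (x : Int) : spanI p x ≤ (p.length : Int) := by
  have h1 := lIdx_le p x
  have h2 := fIdx_nonneg p x
  simp only [spanI]; omega

theorem IsDeg_nonneg {p : List Int} {d : Int} (h : IsDeg p d) : 0 ≤ d := by
  rcases h with ⟨h1, h2, h3⟩
  by_cases hp : p = []
  · have := h2 hp; omega
  · rcases h3 hp with ⟨x, hx, hc⟩
    have := cntI_nonneg p x
    omega

theorem IsDeg_unique {p : List Int} {d1 d2 : Int} (h1 : IsDeg p d1) (h2 : IsDeg p d2) :
    d1 = d2 := by
  by_cases hp : p = []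
  · rw [h1.2.1 hp, h2.2.1 hp]
  · rcases h1.2.2 hp with ⟨x1, hx1, hc1⟩
    rcases h2.2.2 hp with ⟨x2, hx2, hc2⟩
    have a1 := h2.1 x1 hx1
    have a2 := h1.1 x2 hx2
    omega

theorem SpanMin_unique {p : List Int} {d m1 m2 : Int} (h1 : SpanMin p d m1) (h2 : SpanMin p d m2) :
    m1 = m2 := by
  by_cases hp : p = []
  · rw [h1.1 hp, h2.1 hp]
  · rcases (h1.2 hp).2 with ⟨x1, hx1, hc1, he1⟩
    rcases (h2.2 hp).2 with ⟨x2, hx2, hc2, he2⟩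
    have a1 := (h2.2 hp).1 x1 hx1 hc1
    have a2 := (h1.2 hp).1 x2 hx2 hc2
    omega

-- generic fold lemmas for A's second and third passes
theorem foldl_max_spec {α : Type} (f : α → Int) (l : List α) (init : Int) :
    init ≤ l.foldl (fun m it => if f it ≥ m then f it else m) init ∧
    (∀ a ∈ l, f a ≤ l.foldl (fun m it => if f it ≥ m then f it else m) init) ∧
    (l.foldl (fun m it => if f it ≥ m then f it else m) init = init ∨
      ∃ a ∈ l, l.foldl (fun m it => if f it ≥ m then f it else m) init = f a) := by
  induction l generalizing init with
  | nil => simp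
  | cons a t ih =>
    simp only [List.foldl_cons]
    by_cases h : f a ≥ init
    · rcases ih (f a) with ⟨i1, i2, i3⟩
      simp only [if_pos h]
      refine ⟨by omega, ?_, ?_⟩
      · intro b hb
        rcases List.mem_cons.1 hb with rfl | hb
        · omega
        · exact i2 b hb
      · rcases i3 with h3 | ⟨b, hb, h3⟩
        · exact Or.inr ⟨a, by simp, h3⟩
        · exact Or.inr ⟨b, by simp [hb], h3⟩
    · rcases ih init with ⟨i1, i2, i3⟩
      simp only [if_neg h]
      refine ⟨i1, ?_, ?_⟩
      · intro b hb
        rcases List.mem_cons.1 hb with rfl | hb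
        · omega
        · exact i2 b hb
      · rcases i3 with h3 | ⟨b, hb, h3⟩
        · exact Or.inl h3
        · exact Or.inr ⟨b, by simp [hb], h3⟩

theorem foldl_min_spec {α : Type} (P : α → Prop) [DecidablePred P] (f : α → Int)
    (l : List α) (init : Int) :
    l.foldl (fun m it => if P it ∧ f it < m then f it else m) init ≤ init ∧
    (∀ a ∈ l, P a → l.foldl (fun m it => if P it ∧ f it < m then f it else m) init ≤ f a) ∧
    (l.foldl (fun m it => if P it ∧ f it < m then f it else m) init = init ∨
      ∃ a ∈ l, P a ∧ l.foldl (fun m it => if P it ∧ f it < m then f it else m) init = f a) := by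
  induction l generalizing init with
  | nil => simp
  | cons a t ih =>
    simp only [List.foldl_cons]
    by_cases h : P a ∧ f a < init
    · rcases ih (f a) with ⟨i1, i2, i3⟩
      simp only [if_pos h]
      refine ⟨by omega, ?_, ?_⟩
      · intro b hb hPb
        rcases List.mem_cons.1 hb with rfl | hb
        · omega
        · exact i2 b hb hPb
      · rcases i3 with h3 | ⟨b, hb, hPb, h3⟩
        · exact Or.inr ⟨a, by simp, h.1, h3⟩
        · exact Or.inr ⟨b, by simp [hb], hPb, h3⟩
    · rcases ih init with ⟨i1, i2, i3⟩
      simp only [if_neg h]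
      refine ⟨i1, ?_, ?_⟩
      · intro b hb hPb
        rcases List.mem_cons.1 hb with rfl | hb
        · rcases not_and_or.1 h with h' | h'
          · exact absurd hPb h'
          · omega
        · exact i2 b hb hPb
      · rcases i3 with h3 | ⟨b, hb, hPb, h3⟩
        · exact Or.inl h3
        · exact Or.inr ⟨b, by simp [hb], hPb, h3⟩

-- characterization of A's dict after the first loop
theorem zaoyin_dict_spec (p : List Int) :
    ((PySem.List.enumerate p).foldl zaoyinStep PySem.Dict.empty).keys.Nodup ∧
    ∀ x, ((PySem.List.enumerate p).foldl zaoyinStep PySem.Dict.empty).get? x =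
      if x ∈ p then some (cntI p x, fIdx p x, lIdx p x) else none := by
  induction p using List.reverseRecOn with
  | nil =>
    refine ⟨by simp [PySem.List.enumerate_nil], ?_⟩
    intro x
    simp [PySem.List.enumerate_nil, PySem.Dict.get?_empty]
  | append_singleton p y ih =>
    rcases ih with ⟨hnd, hget⟩
    have hfold : (PySem.List.enumerate (p ++ [y])).foldl zaoyinStep PySem.Dict.empty
        = zaoyinStep ((PySem.List.enumerate p).foldl zaoyinStep PySem.Dict.empty)
            ((p.length : Int), y) := by
      rw [PySem.List.enumerate_append, List.foldl_append]
      simp [PySem.List.enumerate_cons, PySem.List.enumerate_nil]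
    rw [hfold]
    by_cases hy : y ∈ p
    · rw [zaoyinStep, hget y, if_pos hy]
      refine ⟨PySem.Dict.nodup_keys_insert _ _ _ hnd, ?_⟩
      intro x
      rw [PySem.Dict.get?_insert]
      by_cases hxy : x = y
      · rw [hxy]
        have hmem : y ∈ p ++ [y] := by simp
        rw [if_pos rfl, if_pos hmem, cntI_append, fIdx_append_of_mem _ hy, lIdx_append_self]
        simp
      · rw [if_neg hxy, hget x]
        have hmem : x ∈ p ++ [y] ↔ x ∈ p := by simp [hxy]
        by_cases hx : x ∈ p
        · rw [if_pos hx, if_pos (hmem.2 hx), cntI_append, fIdx_append_of_mem _ hx,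
            lIdx_append_of_ne _ hxy]
          have hyx : ¬ y = x := fun h => hxy h.symm
          simp [hyx]
        · rw [if_neg hx, if_neg (fun h => hx (hmem.1 h))]
    · rw [zaoyinStep, hget y, if_neg hy]
      refine ⟨PySem.Dict.nodup_keys_insert _ _ _ hnd, ?_⟩
      intro x
      rw [PySem.Dict.get?_insert]
      by_cases hxy : x = y
      · rw [hxy]
        have hmem : y ∈ p ++ [y] := by simp
        rw [if_pos rfl, if_pos hmem, cntI_append, fIdx_append_of_not_mem _ hy, lIdx_append_self]
        have : cntI p y = 0 := by simp [cntI, List.count_eq_zero.2 hy]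
        simp [this, fIdx]
      · rw [if_neg hxy, hget x]
        have hmem : x ∈ p ++ [y] ↔ x ∈ p := by simp [hxy]
        by_cases hx : x ∈ p
        · rw [if_pos hx, if_pos (hmem.2 hx), cntI_append, fIdx_append_of_mem _ hx,
            lIdx_append_of_ne _ hxy]
          have hyx : ¬ y = x := fun h => hxy h.symm
          simp [hyx]
        · rw [if_neg hx, if_neg (fun h => hx (hmem.1 h))]

-- B's loop invariant
def BInv (p : List Int) (s : PySem.Dict Int Int × PySem.Dict Int Int × Int × Int) : Prop :=
  (∀ x, s.1.getD x 0 = cntI p x) ∧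
  (∀ x, s.2.1.get? x = if x ∈ p then some (fIdx p x) else none) ∧
  IsDeg p s.2.2.1 ∧ SpanMin p s.2.2.1 s.2.2.2

theorem BInv_step (p : List Int) (y : Int)
    (s : PySem.Dict Int Int × PySem.Dict Int Int × Int × Int) (h : BInv p s) :
    BInv (p ++ [y]) (zaoyinAltStep s ((p.length : Int), y)) := by
  obtain ⟨cnt, fst, deg, ml⟩ := s
  obtain ⟨ha, hb, hdg, hml⟩ := h
  dsimp only at ha hb hdg hml
  have hcy : cnt.getD y 0 = cntI p y := ha y
  have hdeg0 : 0 ≤ deg := IsDeg_nonneg hdg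
  have hcy0 : 0 ≤ cntI p y := cntI_nonneg p y
  have hcnty : cntI (p ++ [y]) y = cntI p y + 1 := by rw [cntI_append]; simp
  have hcntne : ∀ x, x ≠ y → cntI (p ++ [y]) x = cntI p x := by
    intro x hx
    rw [cntI_append]
    have hyx : ¬ y = x := fun h => hx h.symm
    simp [hyx]
  have hspanne : ∀ x, x ∈ p → x ≠ y → spanI (p ++ [y]) x = spanI p x := by
    intro x hx hxy
    simp [spanI, lIdx_append_of_ne _ hxy, fIdx_append_of_mem _ hx]
  have hspany : spanI (p ++ [y]) y = (p.length : Int) - fIdx (p ++ [y]) y + 1 := by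
    simp only [spanI, lIdx_append_self]
  obtain ⟨fst', hfsteq, hb'⟩ : ∃ f' : PySem.Dict Int Int,
      (if fst.contains y = true then fst else fst.insert y ((p.length : Int))) = f' ∧
      ∀ x, f'.get? x = if x ∈ p ++ [y] then some (fIdx (p ++ [y]) x) else none := by
    by_cases hy : y ∈ p
    · have hcont : fst.contains y = true := by
        rw [PySem.Dict.contains_eq_isSome_get?, hb y, if_pos hy]; rfl
      refine ⟨fst, by rw [if_pos hcont], ?_⟩
      intro x
      rw [hb x]
      by_cases hx : x ∈ p
      · rw [if_pos hx, if_pos (by simp [hx]), fIdx_append_of_mem _ hx]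
      · have hnm : x ∉ p ++ [y] := by
          simp only [List.mem_append, List.mem_singleton]
          rintro (h | h)
          · exact hx h
          · exact hx (h ▸ hy)
        rw [if_neg hx, if_neg hnm]
    · have hcont : fst.contains y = false := by
        rw [PySem.Dict.contains_eq_isSome_get?, hb y, if_neg hy]; rfl
      refine ⟨fst.insert y ((p.length : Int)), by rw [hcont]; simp, ?_⟩
      intro x
      rw [PySem.Dict.get?_insert]
      by_cases hxy : x = y
      · rw [if_pos hxy, if_pos (by simp [hxy]), hxy, fIdx_append_of_not_mem _ hy]
        simp [fIdx]
      · rw [if_neg hxy, hb x]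
        by_cases hx : x ∈ p
        · rw [if_pos hx, if_pos (by simp [hx]), fIdx_append_of_mem _ hx]
        · rw [if_neg hx, if_neg (by simp [hx, hxy])]
  have hfy : fst'.getD y 0 = fIdx (p ++ [y]) y := by
    rw [PySem.Dict.getD_eq_get?_getD, hb' y, if_pos (by simp)]; rfl
  have ha' : ∀ x, (cnt.insert y (cntI p y + 1)).getD x 0 = cntI (p ++ [y]) x := by
    intro x
    rw [PySem.Dict.getD_insert]
    by_cases hxy : x = y
    · rw [if_pos hxy, hxy, hcnty]
    · rw [if_neg hxy, ha x, hcntne x hxy]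
  have hne : p ++ [y] ≠ [] := by simp
  simp only [zaoyinAltStep]
  rw [hfsteq, hcy, hfy]
  unfold BInv IsDeg SpanMin
  split_ifs with h1 h2 hspl
  · -- new strict maximum: degree := cntI p y + 1, min_length := span of y
    dsimp only
    refine ⟨ha', hb', ⟨?_, fun h => absurd h hne, fun _ => ⟨y, by simp, hcnty⟩⟩,
      fun h => absurd h hne, fun _ => ⟨?_, y, by simp, hcnty, by omega⟩⟩
    · intro x hx
      by_cases hxy : x = y
      · rw [hxy, hcnty]
      · have hxp : x ∈ p := by
          rcases List.mem_append.1 hx with h | h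
          · exact h
          · exact absurd (List.mem_singleton.1 h) hxy
        have := hdg.1 x hxp
        rw [hcntne x hxy]
        omega
    · intro x hx hc
      by_cases hxy : x = y
      · rw [hxy]; omega
      · have hxp : x ∈ p := by
          rcases List.mem_append.1 hx with h | h
          · exact h
          · exact absurd (List.mem_singleton.1 h) hxy
        have := hdg.1 x hxp
        rw [hcntne x hxy] at hc
        omega
  · -- ties the maximum, new element's span is smaller
    dsimp only
    have hpne : p ≠ [] := by
      intro h
      have hz := hdg.2.1 h
      have : cntI p y = 0 := by rw [h]; simp [cntI]
      omega
    obtain ⟨x0, hx0, hc0, he0⟩ := (hml.2 hpne).2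
    have hx0y : x0 ≠ y := by
      intro h
      rw [h] at hc0
      omega
    have hs0 : spanI (p ++ [y]) x0 = spanI p x0 := hspanne x0 hx0 hx0y
    have hc0' : cntI (p ++ [y]) x0 = deg := by rw [hcntne x0 hx0y]; exact hc0
    refine ⟨ha', hb', ⟨?_, fun h => absurd h hne, fun _ => ⟨y, by simp, by omega⟩⟩,
      fun h => absurd h hne, fun _ => ⟨?_, y, by simp, by omega, by omega⟩⟩
    · intro x hx
      by_cases hxy : x = y
      · rw [hxy, hcnty]; omega
      · have hxp : x ∈ p := by
          rcases List.mem_append.1 hx with h | h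
          · exact h
          · exact absurd (List.mem_singleton.1 h) hxy
        have := hdg.1 x hxp
        rw [hcntne x hxy]
        omega
    · intro x hx hc
      by_cases hxy : x = y
      · rw [hxy]
        omega
      · have hxp : x ∈ p := by
          rcases List.mem_append.1 hx with h | h
          · exact h
          · exact absurd (List.mem_singleton.1 h) hxy
        rw [hcntne x hxy] at hc
        have hold := (hml.2 hpne).1 x hxp hc
        rw [hspanne x hxp hxy]
        omega
  · -- ties the maximum, previous min_length kept
    dsimp only
    have hpne : p ≠ [] := by
      intro h
      have hz := hdg.2.1 h
      have : cntI p y = 0 := by rw [h]; simp [cntI]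
      omega
    obtain ⟨x0, hx0, hc0, he0⟩ := (hml.2 hpne).2
    have hx0y : x0 ≠ y := by
      intro h
      rw [h] at hc0
      omega
    have hs0 : spanI (p ++ [y]) x0 = spanI p x0 := hspanne x0 hx0 hx0y
    have hc0' : cntI (p ++ [y]) x0 = deg := by rw [hcntne x0 hx0y]; exact hc0
    refine ⟨ha', hb', ⟨?_, fun h => absurd h hne, fun _ => ⟨y, by simp, by omega⟩⟩,
      fun h => absurd h hne, fun _ => ⟨?_, x0, by simp [hx0], hc0', by omega⟩⟩
    · intro x hx
      by_cases hxy : x = y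
      · rw [hxy, hcnty]; omega
      · have hxp : x ∈ p := by
          rcases List.mem_append.1 hx with h | h
          · exact h
          · exact absurd (List.mem_singleton.1 h) hxy
        have := hdg.1 x hxp
        rw [hcntne x hxy]
        omega
    · intro x hx hc
      by_cases hxy : x = y
      · rw [hxy]
        omega
      · have hxp : x ∈ p := by
          rcases List.mem_append.1 hx with h | h
          · exact h
          · exact absurd (List.mem_singleton.1 h) hxy
        rw [hcntne x hxy] at hc
        have hold := (hml.2 hpne).1 x hxp hc
        rw [hspanne x hxp hxy]
        omega
  · -- below the maximum: state unchanged
    dsimp only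
    have hpne : p ≠ [] := by
      intro h
      have hz := hdg.2.1 h
      omega
    obtain ⟨x0, hx0, hc0, he0⟩ := (hml.2 hpne).2
    have hx0y : x0 ≠ y := by
      intro h
      rw [h] at hc0
      omega
    have hs0 : spanI (p ++ [y]) x0 = spanI p x0 := hspanne x0 hx0 hx0y
    have hc0' : cntI (p ++ [y]) x0 = deg := by rw [hcntne x0 hx0y]; exact hc0
    obtain ⟨x1, hx1, hc1⟩ := hdg.2.2 hpne
    have hx1y : x1 ≠ y := by
      intro h
      rw [h] at hc1
      omega
    refine ⟨ha', hb',
      ⟨?_, fun h => absurd h hne,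
        fun _ => ⟨x1, by simp [hx1], by rw [hcntne x1 hx1y]; exact hc1⟩⟩,
      fun h => absurd h hne, fun _ => ⟨?_, x0, by simp [hx0], hc0', by omega⟩⟩
    · intro x hx
      by_cases hxy : x = y
      · rw [hxy, hcnty]; omega
      · have hxp : x ∈ p := by
          rcases List.mem_append.1 hx with h | h
          · exact h
          · exact absurd (List.mem_singleton.1 h) hxy
        have := hdg.1 x hxp
        rw [hcntne x hxy]
        omega
    · intro x hx hc
      by_cases hxy : x = y
      · rw [hxy, hcnty] at hc
        omega
      · have hxp : x ∈ p := by
          rcases List.mem_append.1 hx with h | h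
          · exact h
          · exact absurd (List.mem_singleton.1 h) hxy
        rw [hcntne x hxy] at hc
        have hold := (hml.2 hpne).1 x hxp hc
        rw [hspanne x hxp hxy]
        omega

theorem zaoyin_alt_inv (p : List Int) :
    BInv p ((PySem.List.enumerate p).foldl zaoyinAltStep
      (PySem.Dict.empty, PySem.Dict.empty, 0, 0)) := by
  induction p using List.reverseRecOn with
  | nil =>
    rw [PySem.List.enumerate_nil]
    exact ⟨fun x => by simp [cntI, PySem.Dict.getD_empty],
           fun x => by simp [PySem.Dict.get?_empty],
           ⟨fun x hx => by simp at hx, fun _ => rfl, fun h => absurd rfl h⟩,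
           fun _ => rfl, fun h => absurd rfl h⟩
  | append_singleton p y ih =>
    have hfold : (PySem.List.enumerate (p ++ [y])).foldl zaoyinAltStep
        (PySem.Dict.empty, PySem.Dict.empty, 0, 0)
        = zaoyinAltStep ((PySem.List.enumerate p).foldl zaoyinAltStep
            (PySem.Dict.empty, PySem.Dict.empty, 0, 0)) ((p.length : Int), y) := by
      rw [PySem.List.enumerate_append, List.foldl_append]
      simp [PySem.List.enumerate_cons, PySem.List.enumerate_nil]
    rw [hfold]
    exact BInv_step p y _ ih

theorem items_nil_of_nil {p : List Int} (items : List (Int × (Int × Int × Int)))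
    (hitems : ∀ k v, ((k, v) ∈ items ↔ k ∈ p ∧ v = (cntI p k, fIdx p k, lIdx p k)))
    (hp : p = []) : items = [] := by
  refine List.eq_nil_iff_forall_not_mem.2 ?_
  rintro ⟨k, v⟩ ha
  have := ((hitems k v).1 ha).1
  simp [hp] at this

theorem pass2_spec (p : List Int) (items : List (Int × (Int × Int × Int)))
    (hitems : ∀ k v, ((k, v) ∈ items ↔ k ∈ p ∧ v = (cntI p k, fIdx p k, lIdx p k))) :
    IsDeg p (items.foldl (fun m it => if it.2.1 ≥ m then it.2.1 else m) 0) := by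
  obtain ⟨hge0, hub, hattain⟩ := foldl_max_spec (fun it => it.2.1) items 0
  refine ⟨?_, ?_, ?_⟩
  · intro x hx
    exact hub _ ((hitems x _).2 ⟨hx, rfl⟩)
  · intro hp
    simp [items_nil_of_nil items hitems hp]
  · intro hp
    rcases hattain with h0 | ⟨a, ha, hval⟩
    · obtain ⟨x0, hx0⟩ := List.exists_mem_of_ne_nil p hp
      have h1 := hub _ ((hitems x0 _).2 ⟨hx0, rfl⟩)
      have h2 := cntI_pos hx0
      dsimp only at h1
      omega
    · obtain ⟨k, v⟩ := a
      obtain ⟨hk, hv⟩ := (hitems k v).1 ha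
      subst hv
      dsimp only at hval
      exact ⟨k, hk, hval.symm⟩

theorem pass3_spec (p : List Int) (items : List (Int × (Int × Int × Int))) (mx : Int)
    (hitems : ∀ k v, ((k, v) ∈ items ↔ k ∈ p ∧ v = (cntI p k, fIdx p k, lIdx p k)))
    (hdeg : IsDeg p mx) :
    SpanMin p mx (items.foldl
      (fun m it => if it.2.1 = mx ∧ it.2.2.2 - it.2.2.1 + 1 < m then it.2.2.2 - it.2.2.1 + 1 else m)
      ((p.length : Int))) := by
  obtain ⟨hle, hlb, hattain⟩ := foldl_min_spec (fun it => it.2.1 = mx)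
    (fun it => it.2.2.2 - it.2.2.1 + 1) items ((p.length : Int))
  refine ⟨?_, ?_⟩
  · intro hp
    simp [items_nil_of_nil items hitems hp, hp]
  · intro hp
    constructor
    · intro x hx hc
      have h := hlb _ ((hitems x _).2 ⟨hx, rfl⟩) (by dsimp only; exact hc)
      simpa [spanI] using h
    · obtain ⟨x0, hx0, hc0⟩ := hdeg.2.2 hp
      have hub0 := hlb _ ((hitems x0 _).2 ⟨hx0, rfl⟩) (by dsimp only; exact hc0)
      rcases hattain with h0 | ⟨a, ha, hP, hval⟩
      · refine ⟨x0, hx0, hc0, ?_⟩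
        have hs := spanI_le p x0
        simp only [spanI] at hs ⊢
        dsimp only at hub0
        omega
      · obtain ⟨k, v⟩ := a
        obtain ⟨hk, hv⟩ := (hitems k v).1 ha
        subst hv
        dsimp only at hP hval
        refine ⟨k, hk, hP, by simpa [spanI] using hval⟩

theorem zaoyin_char (p : List Int) : ∃ d, IsDeg p d ∧ SpanMin p d (zaoyin p) := by
  obtain ⟨hnd, hget⟩ := zaoyin_dict_spec p
  have hitems : ∀ k v,
      ((k, v) ∈ ((PySem.List.enumerate p).foldl zaoyinStep PySem.Dict.empty).items ↔
        k ∈ p ∧ v = (cntI p k, fIdx p k, lIdx p k)) := by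
    intro k v
    rw [← PySem.Dict.get?_eq_some_iff_mem_items _ k v hnd, hget k]
    by_cases hk : k ∈ p
    · simp [hk, eq_comm]
    · simp [hk]
  have h2 := pass2_spec p _ hitems
  have h3 := pass3_spec p _ _ hitems h2
  exact ⟨_, h2, h3⟩

-- ===== VERDICT (by name: the statement is the Claim_ definition above) =====
theorem zaoyin_spec : Claim_equal_zaoyin := by
  intro nums _
  unfold Spec_zaoyin
  rcases zaoyin_char nums with ⟨d, hd, hm⟩
  rcases zaoyin_alt_inv nums with ⟨_, _, hd', hm'⟩
  have hdd : d = _ := IsDeg_unique hd hd'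
  subst hdd
  exact SpanMin_unique hm hm'
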